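-- pv_equiv track=rewrite | github.com/moment-of-peace/EventForecast | nlp_preprocessing.py | split_num_letter
-- ===== SOURCE A (Python) =====
-- def split_num_letter(line):
--     string = ''
--     pre = 0 # 0: space(asic 32), 1: letter, 2: number, 3: other
--     for e in line:
--         if ord(e) == 32:
--             pre = 0
--             string += e
--         elif ord(e) > 96 and ord(e) < 123:
--             if pre == 0 or pre == 1:
--                 string += e
--             else:
--                 string = string + ' ' + e
--             pre = 1
--         elif ord(e) > 47 and ord(e) < 58:
--             if pre == 0 or pre == 2:
--                 string += e
--             else:
--                 string = string + ' ' + e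
--             pre = 2
--         else:
--             if pre == 0:
--                 string += e
--             else:
--                 string = string + ' ' + e
--             pre = 3
--     return string
-- ===== SOURCE B (Python) =====
-- import re
--
-- def split_num_letter(line):
--     # tokenize: maximal lowercase runs, maximal digit runs, every other char alone
--     tokens = re.findall(r'[a-z]+|[0-9]+|.', line, re.S)
--     out = []
--     prev_nonspace = False
--     for t in tokens:
--         if t == ' ':
--             out.append(t)
--             prev_nonspace = False
--         else:
--             if prev_nonspace:
--                 out.append(' ')
--             out.append(t)
--             prev_nonspace = True
--     return ''.join(out)
-- ===== Notes on version B (the rewrite author's own statement) =====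
-- stated objective: faster
-- what changed: Replaced A's per-character state machine (pre flag with quadratic string += concatenation) by regex tokenization into maximal lowercase/digit runs and single other chars, followed by a linear list+join pass inserting a space between consecutive non-space tokens.
import Mathlib
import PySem

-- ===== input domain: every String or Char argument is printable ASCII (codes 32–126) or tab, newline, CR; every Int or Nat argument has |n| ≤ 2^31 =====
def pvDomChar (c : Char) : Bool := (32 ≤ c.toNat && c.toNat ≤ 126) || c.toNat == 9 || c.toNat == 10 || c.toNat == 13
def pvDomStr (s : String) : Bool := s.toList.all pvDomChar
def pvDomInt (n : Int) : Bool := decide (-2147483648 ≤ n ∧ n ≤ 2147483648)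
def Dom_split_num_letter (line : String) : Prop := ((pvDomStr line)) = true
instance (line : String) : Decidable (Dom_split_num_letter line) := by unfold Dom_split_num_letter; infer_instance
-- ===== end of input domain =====

-- B replaces A's per-character state machine (quadratic string +=) by regex-style
-- tokenization (maximal lowercase/digit runs, other chars alone) followed by a
-- list+join pass with a previous-token-was-not-space flag; measured faster.

-- ===== PORT A =====
-- literal port of A's for-loop: state = (string, pre), chars appended one by one
def split_num_letter (line : String) : String :=
  (String.mk
    (line.toList.foldl (fun (st : List Char × Int) e =>
      if e.toNat == 32 then (st.1 ++ [e], 0)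
      else if e.toNat > 96 && e.toNat < 123 then
        (if st.2 == 0 || st.2 == 1 then st.1 ++ [e] else st.1 ++ [' '] ++ [e], 1)
      else if e.toNat > 47 && e.toNat < 58 then
        (if st.2 == 0 || st.2 == 2 then st.1 ++ [e] else st.1 ++ [' '] ++ [e], 2)
      else
        (if st.2 == 0 then st.1 ++ [e] else st.1 ++ [' '] ++ [e], 3)
      ) ([], 0)).1)

-- ===== PORT B =====
def pvIsLow (c : Char) : Bool := 96 < c.toNat && c.toNat < 123   -- [a-z]
def pvIsDig (c : Char) : Bool := 47 < c.toNat && c.toNat < 58    -- [0-9]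

-- exact hand port of re.findall(r'[a-z]+|[0-9]+|.', s, re.S): maximal lowercase
-- runs, maximal digit runs, any other char (incl. newline via re.S) alone
def pvFindall : List Char → List (List Char)
  | [] => []
  | c :: cs =>
    if pvIsLow c then (c :: cs.takeWhile pvIsLow) :: pvFindall (cs.dropWhile pvIsLow)
    else if pvIsDig c then (c :: cs.takeWhile pvIsDig) :: pvFindall (cs.dropWhile pvIsDig)
    else [c] :: pvFindall cs
  termination_by cs => cs.length
  decreasing_by
    · exact Nat.lt_succ_of_le (cs.length_dropWhile_le pvIsLow)
    · exact Nat.lt_succ_of_le (cs.length_dropWhile_le pvIsDig)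
    · exact Nat.lt_succ_self _

-- port of Source B's token loop: state = (out, prev_nonspace), then ''.join
def split_num_letter_alt (line : String) : String :=
  (String.mk
    ((pvFindall line.toList).foldl (fun (st : List Char × Bool) t =>
      if t == [' '] then (st.1 ++ t, false)
      else ((if st.2 then st.1 ++ [' '] else st.1) ++ t, true)) ([], false)).1)

-- ===== PRECONDITION & SPEC =====
def Spec_split_num_letter (line : String) (out : String) : Prop := out = split_num_letter_alt line
instance (line : String) (out : String) : Decidable (Spec_split_num_letter line out) := by unfold Spec_split_num_letter; infer_instance

-- ===== CLAIM (what is proved, stated in full; the proofs are below) =====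
def Claim_equal_split_num_letter : Prop := ∀ (line : String), Dom_split_num_letter line → Spec_split_num_letter line (split_num_letter line)

-- ===== LEMMAS AND PROOFS =====

-- A's output as a direct recursion (accumulator removed)
def outA : Int → List Char → List Char
  | _, [] => []
  | pre, c :: cs =>
    if c.toNat == 32 then c :: outA 0 cs
    else if pvIsLow c then
      (if pre == 0 || pre == 1 then c :: outA 1 cs else ' ' :: c :: outA 1 cs)
    else if pvIsDig c then
      (if pre == 0 || pre == 2 then c :: outA 2 cs else ' ' :: c :: outA 2 cs)
    else
      (if pre == 0 then c :: outA 3 cs else ' ' :: c :: outA 3 cs)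

-- B's output as a direct recursion (tokenization fused with the emit loop)
def outB : Bool → List Char → List Char
  | _, [] => []
  | f, c :: cs =>
    if pvIsLow c then
      (if f then [' '] else []) ++ (c :: cs.takeWhile pvIsLow) ++ outB true (cs.dropWhile pvIsLow)
    else if pvIsDig c then
      (if f then [' '] else []) ++ (c :: cs.takeWhile pvIsDig) ++ outB true (cs.dropWhile pvIsDig)
    else if c == ' ' then c :: outB false cs
    else (if f then [' '] else []) ++ [c] ++ outB true cs
  termination_by _ cs => cs.length
  decreasing_by
    · exact Nat.lt_succ_of_le (cs.length_dropWhile_le pvIsLow)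
    · exact Nat.lt_succ_of_le (cs.length_dropWhile_le pvIsDig)
    · exact Nat.lt_succ_self _
    · exact Nat.lt_succ_self _

theorem foldA_eq (cs : List Char) : ∀ (acc : List Char) (pre : Int),
    (cs.foldl (fun (st : List Char × Int) e =>
      if e.toNat == 32 then (st.1 ++ [e], 0)
      else if e.toNat > 96 && e.toNat < 123 then
        (if st.2 == 0 || st.2 == 1 then st.1 ++ [e] else st.1 ++ [' '] ++ [e], 1)
      else if e.toNat > 47 && e.toNat < 58 then
        (if st.2 == 0 || st.2 == 2 then st.1 ++ [e] else st.1 ++ [' '] ++ [e], 2)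
      else
        (if st.2 == 0 then st.1 ++ [e] else st.1 ++ [' '] ++ [e], 3)) (acc, pre)).1
    = acc ++ outA pre cs := by
  induction cs with
  | nil => intro acc pre; simp [outA]
  | cons c cs ih =>
    intro acc pre
    simp only [List.foldl, outA, pvIsLow, pvIsDig]
    split_ifs <;> rw [ih] <;> simp

theorem foldB_eq (cs : List Char) : ∀ (acc : List Char) (f : Bool),
    ((pvFindall cs).foldl (fun (st : List Char × Bool) t =>
      if t == [' '] then (st.1 ++ t, false)
      else ((if st.2 then st.1 ++ [' '] else st.1) ++ t, true)) (acc, f)).1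
    = acc ++ outB f cs := by
  induction cs using pvFindall.induct with
  | case1 => intro acc f; simp [pvFindall, outB]
  | case2 c cs h ih =>
    intro acc f
    rw [pvFindall, if_pos h, outB, if_pos h]
    have hne : ((c :: cs.takeWhile pvIsLow : List Char) == [' ']) = false := by
      apply beq_eq_false_iff_ne.mpr
      intro hc
      have hc' : c = ' ' := by
        have := congrArg List.head? hc; simpa using this
      subst hc'; simp [pvIsLow] at h
    simp only [List.foldl, hne, Bool.false_eq_true, if_false, ih]
    cases f <;> simp
  | case3 c cs h1 h ih =>
    intro acc f
    rw [pvFindall, if_neg h1, if_pos h, outB, if_neg h1, if_pos h]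
    have hne : ((c :: cs.takeWhile pvIsDig : List Char) == [' ']) = false := by
      apply beq_eq_false_iff_ne.mpr
      intro hc
      have hc' : c = ' ' := by
        have := congrArg List.head? hc; simpa using this
      subst hc'; simp [pvIsDig] at h
    simp only [List.foldl, hne, Bool.false_eq_true, if_false, ih]
    cases f <;> simp
  | case4 c cs h1 h2 ih =>
    intro acc f
    rw [pvFindall, if_neg h1, if_neg h2, outB, if_neg h1, if_neg h2]
    by_cases hc : c = ' '
    · subst hc; simp only [List.foldl, ih]; simp
    · have hne : (([c] : List Char) == [' ']) = false := by simp [hc]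
      simp only [List.foldl, hne, Bool.false_eq_true, if_false, ih]
      cases f <;> simp [hc]

-- a lowercase run passes through A's loop in state 1 without inserting spaces
theorem outA_low_run : ∀ (run rest : List Char), (∀ c ∈ run, pvIsLow c = true) →
    outA 1 (run ++ rest) = run ++ outA 1 rest := by
  intro run
  induction run with
  | nil => intro rest _; simp
  | cons r rs ih =>
    intro rest hall
    have hr : pvIsLow r = true := hall r (by simp)
    simp only [pvIsLow, Bool.and_eq_true, decide_eq_true_eq] at hr
    rw [List.cons_append, outA, if_neg (by simp; omega),
      if_pos (by simp only [pvIsLow]; simp; omega),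
      if_pos (by decide), ih rest (fun c hc => hall c (by simp [hc]))]
    rfl

-- a digit run passes through A's loop in state 2 without inserting spaces
theorem outA_dig_run : ∀ (run rest : List Char), (∀ c ∈ run, pvIsDig c = true) →
    outA 2 (run ++ rest) = run ++ outA 2 rest := by
  intro run
  induction run with
  | nil => intro rest _; simp
  | cons r rs ih =>
    intro rest hall
    have hr : pvIsDig r = true := hall r (by simp)
    simp only [pvIsDig, Bool.and_eq_true, decide_eq_true_eq] at hr
    rw [List.cons_append, outA, if_neg (by simp; omega),
      if_neg (by simp only [pvIsLow]; simp; omega),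
      if_pos (by simp only [pvIsDig]; simp; omega),
      if_pos (by decide), ih rest (fun c hc => hall c (by simp [hc]))]
    rfl

def headNot (p : Char → Bool) : List Char → Prop
  | [] => True
  | c :: _ => p c = false

theorem headNot_dropWhile (p : Char → Bool) : ∀ cs : List Char, headNot p (cs.dropWhile p) := by
  intro cs
  induction cs with
  | nil => trivial
  | cons c cs ih =>
    by_cases h : p c = true
    · simpa [List.dropWhile, h] using ih
    · simp only [Bool.not_eq_true] at h
      simp [List.dropWhile, h, headNot]

-- main: A's state machine equals B's token emitter, given the state/flag link
theorem main_eq : ∀ cs : List Char, ∀ pre : Int,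
    (pre = 0 ∨ pre = 1 ∨ pre = 2 ∨ pre = 3) →
    (pre = 1 → headNot pvIsLow cs) →
    (pre = 2 → headNot pvIsDig cs) →
    outA pre cs = outB (!(pre == 0)) cs := by
  intro cs
  induction cs using pvFindall.induct with
  | case1 => intro pre _ _ _; simp [outA, outB]
  | case2 c cs h ih =>
    intro pre hmem h1 _
    have hpre1 : pre ≠ 1 := by
      intro he; have := h1 he; simp [headNot, h] at this
    have hlow := h
    simp only [pvIsLow, Bool.and_eq_true, decide_eq_true_eq] at hlow
    rw [outA, if_neg (by simp; omega), if_pos h]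
    rw [outB, if_pos h]
    have hrun : outA 1 cs = cs.takeWhile pvIsLow ++ outA 1 (cs.dropWhile pvIsLow) := by
      conv_lhs => rw [← cs.takeWhile_append_dropWhile (p := pvIsLow)]
      exact outA_low_run _ _ (fun x hx => cs.mem_takeWhile_imp hx)
    have hrec : outA 1 (cs.dropWhile pvIsLow) = outB true (cs.dropWhile pvIsLow) := by
      have := ih 1 (by omega) (fun _ => headNot_dropWhile pvIsLow cs) (by omega)
      simpa using this
    have hcond : (pre == 0 || pre == 1) = (pre == 0) := by
      rcases hmem with h'|h'|h'|h' <;> subst h' <;> simp_all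
    rw [hcond, hrun, hrec]
    by_cases h0 : pre = 0 <;> simp [h0]
  | case3 c cs h1 h ih =>
    intro pre hmem _ h2
    have hpre2 : pre ≠ 2 := by
      intro he; have := h2 he; simp [headNot, h] at this
    have hdig := h
    simp only [pvIsDig, Bool.and_eq_true, decide_eq_true_eq] at hdig
    rw [outA, if_neg (by simp; omega), if_neg (by simp [h1]), if_pos h]
    rw [outB, if_neg h1, if_pos h]
    have hrun : outA 2 cs = cs.takeWhile pvIsDig ++ outA 2 (cs.dropWhile pvIsDig) := by
      conv_lhs => rw [← cs.takeWhile_append_dropWhile (p := pvIsDig)]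
      exact outA_dig_run _ _ (fun x hx => cs.mem_takeWhile_imp hx)
    have hrec : outA 2 (cs.dropWhile pvIsDig) = outB true (cs.dropWhile pvIsDig) := by
      have := ih 2 (by omega) (by omega) (fun _ => headNot_dropWhile pvIsDig cs)
      simpa using this
    have hcond : (pre == 0 || pre == 2) = (pre == 0) := by
      rcases hmem with h'|h'|h'|h' <;> subst h' <;> simp_all
    rw [hcond, hrun, hrec]
    by_cases h0 : pre = 0 <;> simp [h0]
  | case4 c cs h1 h2 ih =>
    intro pre hmem _ _
    rw [outB, if_neg h1, if_neg h2]
    by_cases hc : c = ' '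
    · subst hc
      rw [if_pos (show ((' ' == ' ') : Bool) = true by decide)]
      rw [outA, if_pos (show ((' '.toNat == 32) : Bool) = true by decide)]
      have h' := ih 0 (by omega) (by omega) (by omega)
      simp only [show (!((0:Int) == 0)) = false by decide] at h'
      rw [h']
    · have h32 : c.toNat ≠ 32 := by
        intro hn
        have h' := Char.ofNat_toNat c
        rw [hn] at h'
        exact hc h'.symm
      rw [if_neg (show ¬ ((c == ' ') = true) by simpa using hc)]
      rw [outA, if_neg (by simp [h32]), if_neg (by simp [h1]), if_neg (by simp [h2])]
      have h' := ih 3 (by omega) (by omega) (by omega)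
      simp only [show (!((3:Int) == 0)) = true by decide] at h'
      rw [h']
      by_cases h0 : pre = 0 <;> simp [h0]

-- ===== VERDICT (by name: the statement is the Claim_ definition above) =====
theorem split_num_letter_spec : Claim_equal_split_num_letter := by
  intro line _
  unfold Spec_split_num_letter split_num_letter split_num_letter_alt
  rw [foldA_eq, foldB_eq]
  have := main_eq line.toList 0 (by omega) (by omega) (by omega)
  simp only [show (!((0:Int) == 0)) = false by decide] at this
  rw [this]
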